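-- pv_equiv track=rewrite | github.com/Himansh788/dealiq | backend/services/transcript_analyzer.py | _identify_speakers
-- ===== SOURCE A (Python) =====
-- REP_ROLE_WORDS    = {"rep", "sales", "ae", "sdr", "bdr", "se", "csm", "executive", "manager", "account"}
--
-- PROSPECT_ROLE_WORDS = {"prospect", "customer", "buyer", "client"}
--
-- def _identify_speakers(
--     turns: list[dict],
--     rep_name_hint: str | None = None,
-- ) -> tuple[str | None, str | None]:
--     """
--     Return (rep_label, prospect_label).
--     Priority: role-word match → rep_name_hint → first-speaker fallback.
--     """
--     # ordered unique speakers
--     speakers = list(dict.fromkeys(t["speaker"] for t in turns))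
--     rep_label: str | None = None
--     prospect_label: str | None = None
--
--     for spk in speakers:
--         words = set(spk.lower().split())
--         if words & REP_ROLE_WORDS and not rep_label:
--             rep_label = spk
--         elif words & PROSPECT_ROLE_WORDS and not prospect_label:
--             prospect_label = spk
--
--     if rep_name_hint and not rep_label:
--         hint = rep_name_hint.lower()
--         for spk in speakers:
--             if hint in spk.lower():
--                 rep_label = spk
--                 break
--
--     # fallback: first speaker = rep
--     if not rep_label and speakers:
--         rep_label = speakers[0]
--     if not prospect_label:
--         others = [s for s in speakers if s != rep_label]
--         prospect_label = others[0] if others else None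
--
--     return rep_label, prospect_label
-- ===== SOURCE B (Python) =====
-- REP_ROLE_WORDS    = {"rep", "sales", "ae", "sdr", "bdr", "se", "csm", "executive", "manager", "account"}
--
-- PROSPECT_ROLE_WORDS = {"prospect", "customer", "buyer", "client"}
--
--
-- def _identify_speakers(
--     turns: list[dict],
--     rep_name_hint: str | None = None,
-- ) -> tuple[str | None, str | None]:
--     """
--     Return (rep_label, prospect_label).
--     Single streaming pass over the raw turns: no speaker list is built.
--     A seen-set dedups on the fly while a constant-size summary records the
--     first speaker, the second speaker, the first rep-role speaker, the first
--     two prospect-role speakers and the first hint match; the answer is then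
--     resolved from the summary in O(1).
--     """
--     hint = rep_name_hint.lower() if rep_name_hint else None
--     seen = set()
--     s0 = s1 = rep_role = p0 = p1 = hint_match = None
--     for t in turns:
--         spk = t["speaker"]
--         if spk in seen:
--             continue
--         seen.add(spk)
--         low = spk.lower()
--         words = low.split()
--         if s0 is None:
--             s0 = spk
--         elif s1 is None:
--             s1 = spk
--         if rep_role is None and any(w in REP_ROLE_WORDS for w in words):
--             rep_role = spk
--         if any(w in PROSPECT_ROLE_WORDS for w in words):
--             if p0 is None:
--                 p0 = spk
--             elif p1 is None:
--                 p1 = spk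
--         if hint is not None and hint_match is None and hint in low:
--             hint_match = spk
--
--     rep = rep_role
--     if rep is None and hint is not None:
--         rep = hint_match
--     if rep is None:
--         rep = s0
--     # the speaker claimed as rep by a role word is skipped as prospect
--     prospect = p1 if (p0 is not None and p0 == rep_role) else p0
--     if prospect is None:
--         prospect = s1 if s0 == rep else s0
--     return rep, prospect
-- ===== Notes on version B (the rewrite author's own statement) =====
-- stated objective: alternative
-- what changed: A materialises a dedup'd speakers list and re-scans it up to four times with an interleaved stateful loop; B makes one streaming pass over the raw turns, deduplicating on the fly with a seen-set while maintaining a constant-size summary (first speaker, second speaker, first rep-role speaker, first two prospect-role speakers, first hint match), and resolves the answer from the summary in O(1).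
import Mathlib
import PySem

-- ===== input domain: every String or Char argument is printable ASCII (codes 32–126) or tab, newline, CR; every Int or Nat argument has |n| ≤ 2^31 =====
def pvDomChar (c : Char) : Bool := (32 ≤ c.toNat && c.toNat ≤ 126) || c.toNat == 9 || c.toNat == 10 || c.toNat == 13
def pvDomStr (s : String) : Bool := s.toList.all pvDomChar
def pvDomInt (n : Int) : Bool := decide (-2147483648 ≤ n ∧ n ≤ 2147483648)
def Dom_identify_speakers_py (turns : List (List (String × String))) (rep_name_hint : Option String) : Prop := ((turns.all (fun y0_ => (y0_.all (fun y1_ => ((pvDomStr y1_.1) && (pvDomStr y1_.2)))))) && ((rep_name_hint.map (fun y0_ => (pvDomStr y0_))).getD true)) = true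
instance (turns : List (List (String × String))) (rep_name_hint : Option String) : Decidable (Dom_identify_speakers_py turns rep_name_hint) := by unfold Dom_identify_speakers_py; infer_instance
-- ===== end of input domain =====

set_option maxHeartbeats 1000000


-- B replaces A's dedup'd speakers list and its up-to-four re-scans by ONE streaming pass
-- over the raw turns (seen-set dedup on the fly + a constant-size summary: first speaker,
-- second speaker, first rep-role speaker, first two prospect-role speakers, first hint
-- match), resolved in O(1) at the end; objective: alternative. Return value only.

def pvRepWords : PySem.Set String :=
  PySem.Set.ofList ["rep", "sales", "ae", "sdr", "bdr", "se", "csm", "executive", "manager", "account"]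

def pvProspectWords : PySem.Set String :=
  PySem.Set.ofList ["prospect", "customer", "buyer", "client"]

-- t["speaker"] (Pre_ guarantees the key is present, so the getD default is never used)
def pvSpk (t : List (String × String)) : String :=
  (PySem.Dict.get? (PySem.Dict.mk t) "speaker").getD ""

-- speakers[0] guarded by "and speakers" (dflt = the unchanged rep_label)
def pvHead (l : List String) (dflt : Option String) : Option String :=
  match l with | [] => dflt | s :: _ => some s

-- ===== PORT A =====
-- speakers = list(dict.fromkeys(t["speaker"] for t in turns))
def pvSpeakers (turns : List (List (String × String))) : List String :=
  PySem.List.dedup (turns.map pvSpk)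

-- body of A's for-loop over speakers, carried state (rep_label, prospect_label)
def pvStepA (st : Option String × Option String) (spk : String) : Option String × Option String :=
  let words := PySem.Set.ofList (PySem.Str.split₀ (PySem.Str.lower spk))
  if !(PySem.Set.inter words pvRepWords).isEmpty && st.1.isNone then (some spk, st.2)
  else if !(PySem.Set.inter words pvProspectWords).isEmpty && st.2.isNone then (st.1, some spk)
  else st

def identify_speakers_py (turns : List (List (String × String))) (rep_name_hint : Option String) : Option String × Option String :=
  let speakers := pvSpeakers turns
  let st := speakers.foldl pvStepA (none, none)
  let rep1 : Option String :=
    match rep_name_hint with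
    | some h =>
      if h ≠ "" && st.1.isNone then
        match speakers.find? (fun spk => PySem.Str.isIn (PySem.Str.lower h) (PySem.Str.lower spk)) with
        | some spk => some spk
        | none => st.1
      else st.1
    | none => st.1
  let rep2 := if rep1.isNone then pvHead speakers rep1 else rep1
  let pros := if st.2.isNone then (speakers.filter (fun s => decide (some s ≠ rep2))).head? else st.2
  (rep2, pros)

-- ===== PORT B =====
-- any(w in role_words for w in spk.lower().split())
def pvHasRole (spk : String) (roleWords : PySem.Set String) : Bool :=
  (PySem.Str.split₀ (PySem.Str.lower spk)).any (fun w => PySem.Set.contains roleWords w)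

-- the constant-size summary B maintains during its single pass
structure PvSum where
  s0 : Option String      -- first speaker
  s1 : Option String      -- second speaker
  repR : Option String    -- first rep-role speaker
  p0 : Option String      -- first prospect-role speaker
  p1 : Option String      -- second prospect-role speaker
  hintM : Option String   -- first hint match
deriving Repr, DecidableEq

def pvInit : PvSum := ⟨none, none, none, none, none, none⟩

-- the loop body for one NEW (unseen) speaker
def pvUpd (hint : Option String) (st : PvSum) (spk : String) : PvSum :=
  let low := PySem.Str.lower spk
  { s0 := if st.s0.isNone then some spk else st.s0
    s1 := if st.s0.isSome && st.s1.isNone then some spk else st.s1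
    repR := if st.repR.isNone && pvHasRole spk pvRepWords then some spk else st.repR
    p0 := if pvHasRole spk pvProspectWords && st.p0.isNone then some spk else st.p0
    p1 := if pvHasRole spk pvProspectWords && st.p0.isSome && st.p1.isNone then some spk else st.p1
    hintM := match hint with
      | some h => if st.hintM.isNone && PySem.Str.isIn h low then some spk else st.hintM
      | none => st.hintM }

-- one turn: skip already-seen speakers, otherwise update seen-set and summary
def pvStepB (hint : Option String) (acc : PySem.Set String × PvSum) (t : List (String × String)) : PySem.Set String × PvSum :=
  let spk := pvSpk t
  if PySem.Set.contains acc.1 spk then acc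
  else (PySem.Set.add acc.1 spk, pvUpd hint acc.2 spk)

def identify_speakers_py_alt (turns : List (List (String × String))) (rep_name_hint : Option String) : Option String × Option String :=
  let hint : Option String :=
    match rep_name_hint with
    | some h => if decide (h ≠ "") then some (PySem.Str.lower h) else none
    | none => none
  let st := (turns.foldl (pvStepB hint) (PySem.Set.empty, pvInit)).2
  let rep1 := if st.repR.isNone && hint.isSome then st.hintM else st.repR
  let rep := if rep1.isNone then st.s0 else rep1
  let pros0 := if st.p0.isSome && st.p0 == st.repR then st.p1 else st.p0
  let pros := if pros0.isNone then (if st.s0 == rep then st.s1 else st.s0) else pros0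
  (rep, pros)

-- ===== PRECONDITION & SPEC =====
-- A raises KeyError on any turn dict without a "speaker" key; exactly those inputs are excluded.
def Pre_identify_speakers_py (turns : List (List (String × String))) (rep_name_hint : Option String) : Prop :=
  ∀ t ∈ turns, (PySem.Dict.mk t).contains "speaker" = true
instance (turns : List (List (String × String))) (rep_name_hint : Option String) : Decidable (Pre_identify_speakers_py turns rep_name_hint) := by unfold Pre_identify_speakers_py; infer_instance

def pvWitness_identify_speakers_py : (List (List (String × String))) × Option String :=
  ([[("speaker", "Bob (AE)")], [("speaker", "Jane")]], some "jane")

def Spec_identify_speakers_py (turns : List (List (String × String))) (rep_name_hint : Option String) (out : Option String × Option String) : Prop := out = identify_speakers_py_alt turns rep_name_hint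
instance (turns : List (List (String × String))) (rep_name_hint : Option String) (out : Option String × Option String) : Decidable (Spec_identify_speakers_py turns rep_name_hint out) := by unfold Spec_identify_speakers_py; infer_instance

-- ===== CLAIM (what is proved, stated in full; the proofs are below) =====
def Claim_equal_identify_speakers_py : Prop := ∀ (turns : List (List (String × String))) (rep_name_hint : Option String), Dom_identify_speakers_py turns rep_name_hint → Pre_identify_speakers_py turns rep_name_hint → Spec_identify_speakers_py turns rep_name_hint (identify_speakers_py turns rep_name_hint)

-- ===== LEMMAS AND PROOFS =====

-- "words & ROLE_SET nonempty" (A) coincides with "any word in ROLE_SET" (B)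
theorem pv_role_eq (ws : List String) (t : PySem.Set String) :
    (!(PySem.Set.inter (PySem.Set.ofList ws) t).isEmpty) = ws.any (fun w => PySem.Set.contains t w) := by
  rw [Bool.eq_iff_iff, Bool.not_eq_true', List.any_eq_true]
  constructor
  · intro h
    have hne : PySem.Set.inter (PySem.Set.ofList ws) t ≠ [] := by
      intro e; rw [e] at h; simp at h
    obtain ⟨x, hx⟩ := List.exists_mem_of_ne_nil _ hne
    rw [PySem.Set.mem_inter] at hx
    refine ⟨x, (PySem.Set.mem_ofList ws x).1 hx.1, ?_⟩
    simp [PySem.Set.contains, hx.2]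
  · rintro ⟨x, hxw, hxt⟩
    have hx : x ∈ PySem.Set.inter (PySem.Set.ofList ws) t := by
      rw [PySem.Set.mem_inter]
      exact ⟨(PySem.Set.mem_ofList ws x).2 hxw, by simpa [PySem.Set.contains] using hxt⟩
    cases e : (PySem.Set.inter (PySem.Set.ofList ws) t).isEmpty with
    | false => rfl
    | true => rw [List.isEmpty_iff] at e; rw [e] at hx; simp at hx

theorem pv_stepA_eq (st : Option String × Option String) (spk : String) :
    pvStepA st spk =
      if pvHasRole spk pvRepWords && st.1.isNone then (some spk, st.2)
      else if pvHasRole spk pvProspectWords && st.2.isNone then (st.1, some spk)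
      else st := by
  simp only [pvStepA, pvHasRole, pv_role_eq]
  rfl

theorem pv_fold_done (ss : List String) (a b : String) :
    ss.foldl pvStepA (some a, some b) = (some a, some b) := by
  induction ss with
  | nil => rfl
  | cons s t ih => simp [List.foldl_cons, pv_stepA_eq, ih]

theorem pv_fold_rep (ss : List String) (a : String) :
    ss.foldl pvStepA (some a, none) = (some a, ss.find? (fun s => pvHasRole s pvProspectWords)) := by
  induction ss with
  | nil => rfl
  | cons s t ih =>
    rw [List.foldl_cons, pv_stepA_eq]
    by_cases h : pvHasRole s pvProspectWords = true <;>
      simp [h, pv_fold_done, ih]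

theorem pv_fold_pros (ss : List String) (b : String) :
    ss.foldl pvStepA (none, some b) = (ss.find? (fun s => pvHasRole s pvRepWords), some b) := by
  induction ss with
  | nil => rfl
  | cons s t ih =>
    rw [List.foldl_cons, pv_stepA_eq]
    by_cases h : pvHasRole s pvRepWords = true <;>
      simp [h, pv_fold_done, ih]

-- A's loop result for prospect: first prospect-match, skipping the first rep-match position
def pvProsSkip : List String → Option String
  | [] => none
  | s :: t =>
    if pvHasRole s pvRepWords then t.find? (fun x => pvHasRole x pvProspectWords)
    else if pvHasRole s pvProspectWords then some s
    else pvProsSkip t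

theorem pv_fold_main (ss : List String) :
    ss.foldl pvStepA (none, none) = (ss.find? (fun s => pvHasRole s pvRepWords), pvProsSkip ss) := by
  induction ss with
  | nil => rfl
  | cons s t ih =>
    rw [List.foldl_cons, pv_stepA_eq]
    by_cases h1 : pvHasRole s pvRepWords = true
    · simp [h1, pvProsSkip, pv_fold_rep]
    · by_cases h2 : pvHasRole s pvProspectWords = true <;>
        simp [h1, h2, pvProsSkip, pv_fold_pros, ih]

-- ---- B side: fusing the seen-set pass with dedup ----

-- the new (unseen) speakers, in order
def pvNew (seen : PySem.Set String) : List String → List String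
  | [] => []
  | s :: t => if PySem.Set.contains seen s then pvNew seen t else s :: pvNew (PySem.Set.add seen s) t

theorem pv_foldl_add (l : List String) (seen : PySem.Set String) :
    l.foldl PySem.Set.add seen = seen ++ pvNew seen l := by
  induction l generalizing seen with
  | nil => simp [pvNew]
  | cons s t ih =>
    rw [List.foldl_cons, pvNew]
    by_cases h : PySem.Set.contains seen s = true
    · have hm : s ∈ seen := by simpa [PySem.Set.contains] using h
      have ha : PySem.Set.add seen s = seen := by simp [PySem.Set.add, hm]
      rw [if_pos h, ha, ih]
    · have hm : s ∉ seen := by simpa [PySem.Set.contains] using h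
      have ha : PySem.Set.add seen s = seen ++ [s] := by simp [PySem.Set.add, hm]
      rw [if_neg h, ih, ha, List.append_assoc, List.singleton_append]

theorem pv_new_empty (l : List String) : pvNew PySem.Set.empty l = PySem.List.dedup l := by
  have h := pv_foldl_add l PySem.Set.empty
  rw [PySem.List.dedup_eq_ofList, PySem.Set.ofList_eq_foldl]
  simpa [PySem.Set.empty] using h.symm

theorem pv_stepB_fold (hint : Option String) (turns : List (List (String × String)))
    (acc : PySem.Set String × PvSum) :
    turns.foldl (pvStepB hint) acc = (turns.map pvSpk).foldl
      (fun a s => if PySem.Set.contains a.1 s then a else (PySem.Set.add a.1 s, pvUpd hint a.2 s)) acc := by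
  induction turns generalizing acc with
  | nil => rfl
  | cons t r ih => rw [List.foldl_cons, List.map_cons, List.foldl_cons, ih]; rfl

theorem pv_fuse (hint : Option String) (l : List String) (seen : PySem.Set String) (st : PvSum) :
    l.foldl (fun a s => if PySem.Set.contains a.1 s then a else (PySem.Set.add a.1 s, pvUpd hint a.2 s)) (seen, st)
      = (l.foldl PySem.Set.add seen, (pvNew seen l).foldl (pvUpd hint) st) := by
  induction l generalizing seen st with
  | nil => rfl
  | cons s t ih =>
    rw [List.foldl_cons, List.foldl_cons, pvNew]
    by_cases h : PySem.Set.contains seen s = true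
    · have ha : PySem.Set.add seen s = seen := by
        have hm : s ∈ seen := by simpa [PySem.Set.contains] using h
        simp [PySem.Set.add, hm]
      rw [if_pos h, if_pos h, ha, ih]
    · rw [if_neg h, if_neg h, ih, List.foldl_cons]

-- ---- B side: field characterisations of the summary fold ----

def pvFind2 (p : String → Bool) : List String → Option String
  | [] => none
  | a :: t => if p a then t.find? p else pvFind2 p t

theorem pv_fold_s (h : Option String) (l : List String) (st : PvSum) :
    (l.foldl (pvUpd h) st).s0 = (if st.s0.isSome then st.s0 else l.head?) ∧
    (l.foldl (pvUpd h) st).s1 =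
      (if st.s1.isSome then st.s1 else if st.s0.isSome then l.head? else l.tail.head?) := by
  induction l generalizing st with
  | nil => cases hs0 : st.s0 <;> cases hs1 : st.s1 <;> simp [hs0, hs1]
  | cons a t ih =>
    rw [List.foldl_cons]
    rcases ih (pvUpd h st a) with ⟨i0, i1⟩
    have u0 : (pvUpd h st a).s0 = (if st.s0.isNone then some a else st.s0) := rfl
    have u1 : (pvUpd h st a).s1 = (if st.s0.isSome && st.s1.isNone then some a else st.s1) := rfl
    rw [u0] at i0
    rw [u0, u1] at i1
    rw [i0, i1]
    cases hs0 : st.s0 <;> cases hs1 : st.s1 <;> simp [hs0, hs1]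

theorem pv_fold_repR (h : Option String) (l : List String) (st : PvSum) :
    (l.foldl (pvUpd h) st).repR =
      (if st.repR.isSome then st.repR else l.find? (fun s => pvHasRole s pvRepWords)) := by
  induction l generalizing st with
  | nil => cases hr : st.repR <;> simp [hr]
  | cons a t ih =>
    rw [List.foldl_cons, ih]
    have u : (pvUpd h st a).repR
        = (if st.repR.isNone && pvHasRole a pvRepWords then some a else st.repR) := rfl
    rw [u]
    cases hr : st.repR with
    | some x => simp
    | none =>
      by_cases hp : pvHasRole a pvRepWords = true <;> simp [hp, List.find?_cons]

def pvHintP (hh s : String) : Bool := PySem.Str.isIn hh (PySem.Str.lower s)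

theorem pv_fold_hint (hh : String) (l : List String) (st : PvSum) :
    (l.foldl (pvUpd (some hh)) st).hintM =
      (if st.hintM.isSome then st.hintM else l.find? (fun s => pvHintP hh s)) := by
  induction l generalizing st with
  | nil => cases hr : st.hintM <;> simp [hr]
  | cons a t ih =>
    rw [List.foldl_cons, ih]
    have u : (pvUpd (some hh) st a).hintM
        = (if st.hintM.isNone && pvHintP hh a then some a else st.hintM) := rfl
    rw [u]
    cases hr : st.hintM with
    | some x => simp
    | none =>
      by_cases hp : pvHintP hh a = true <;> simp [hp, List.find?_cons]

theorem pv_fold_p (h : Option String) (l : List String) (st : PvSum) :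
    (l.foldl (pvUpd h) st).p0 =
      (if st.p0.isSome then st.p0 else l.find? (fun s => pvHasRole s pvProspectWords)) ∧
    (l.foldl (pvUpd h) st).p1 =
      (if st.p1.isSome then st.p1
       else if st.p0.isSome then l.find? (fun s => pvHasRole s pvProspectWords)
       else pvFind2 (fun s => pvHasRole s pvProspectWords) l) := by
  induction l generalizing st with
  | nil => cases h0 : st.p0 <;> cases h1 : st.p1 <;> simp [h0, h1, pvFind2]
  | cons a t ih =>
    rw [List.foldl_cons]
    rcases ih (pvUpd h st a) with ⟨i0, i1⟩
    have u0 : (pvUpd h st a).p0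
        = (if pvHasRole a pvProspectWords && st.p0.isNone then some a else st.p0) := rfl
    have u1 : (pvUpd h st a).p1
        = (if pvHasRole a pvProspectWords && st.p0.isSome && st.p1.isNone then some a else st.p1) := rfl
    rw [u0] at i0
    rw [u0, u1] at i1
    rw [i0, i1]
    by_cases hp : pvHasRole a pvProspectWords = true
    · have fc : (a :: t).find? (fun s => pvHasRole s pvProspectWords) = some a :=
        List.find?_cons_of_pos hp
      have f2 : pvFind2 (fun s => pvHasRole s pvProspectWords) (a :: t)
          = t.find? (fun s => pvHasRole s pvProspectWords) := by
        rw [pvFind2, if_pos hp]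
      rw [fc, f2]
      cases h0 : st.p0 <;> cases h1 : st.p1 <;> simp [hp, h0, h1]
    · have fc : (a :: t).find? (fun s => pvHasRole s pvProspectWords)
          = t.find? (fun s => pvHasRole s pvProspectWords) :=
        List.find?_cons_of_neg (by simpa using hp)
      have f2 : pvFind2 (fun s => pvHasRole s pvProspectWords) (a :: t)
          = pvFind2 (fun s => pvHasRole s pvProspectWords) t := by
        rw [pvFind2, if_neg (by simpa using hp)]
      rw [fc, f2]
      cases h0 : st.p0 <;> cases h1 : st.p1 <;> simp [hp, h0, h1]

-- ---- bridging A's interleaved result to B's summary resolution ----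

theorem pv_combo (l : List String) (hnd : l.Nodup) :
    pvProsSkip l =
      (if (l.find? (fun s => pvHasRole s pvProspectWords)).isSome
          && (l.find? (fun s => pvHasRole s pvProspectWords) == l.find? (fun s => pvHasRole s pvRepWords))
       then pvFind2 (fun s => pvHasRole s pvProspectWords) l
       else l.find? (fun s => pvHasRole s pvProspectWords)) := by
  induction l with
  | nil => rfl
  | cons a t ih =>
    obtain ⟨ha, ht⟩ := List.nodup_cons.1 hnd
    by_cases hr : pvHasRole a pvRepWords = true
    · by_cases hp : pvHasRole a pvProspectWords = true
      · simp [pvProsSkip, pvFind2, hr, hp, List.find?_cons]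
      · rw [pvProsSkip, if_pos hr]
        cases e : t.find? (fun s => pvHasRole s pvProspectWords) with
        | none => simp [pvFind2, hr, hp, List.find?_cons, e]
        | some b =>
          have hb : b ∈ t := List.mem_of_find?_eq_some e
          have : b ≠ a := fun hba => ha (hba ▸ hb)
          simp [pvFind2, hr, hp, List.find?_cons, e, this]
    · by_cases hp : pvHasRole a pvProspectWords = true
      · rw [pvProsSkip, if_neg hr, if_pos hp]
        cases e : t.find? (fun s => pvHasRole s pvRepWords) with
        | none => simp [hr, hp, List.find?_cons, e]
        | some x =>
          have hx : x ∈ t := List.mem_of_find?_eq_some e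
          have : a ≠ x := fun hax => ha (hax ▸ hx)
          simp [hr, hp, List.find?_cons, e, this]
      · rw [pvProsSkip, if_neg hr, if_neg hp]
        simp only [List.find?_cons, hr, hp, pvFind2, if_neg]
        simpa [hr, hp] using ih ht

theorem pv_fallback (l : List String) (hnd : l.Nodup) (x : String) (hx : x ∈ l) :
    (l.filter (fun s => decide (some s ≠ some x))).head? =
      (if l.head? == some x then l.tail.head? else l.head?) := by
  cases l with
  | nil => simp at hx
  | cons a t =>
    obtain ⟨ha, ht⟩ := List.nodup_cons.1 hnd
    by_cases hax : a = x
    · subst hax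
      cases t with
      | nil => simp
      | cons b r =>
        have hb : ¬ (b = a) := fun e => ha (by simp [e])
        simp [List.find?_cons, hb]
    · simp [List.filter_cons, hax, Ne.symm, fun h => hax (Option.some.inj h)]

-- the final resolution agrees, given rep is the same and lies in the list (or the list is empty)
theorem pv_fallback2 (l : List String) (hnd : l.Nodup) (rep : Option String)
    (h : (l = [] ∧ rep = none) ∨ (∃ x, rep = some x ∧ x ∈ l)) :
    (l.filter (fun s => decide (some s ≠ rep))).head? =
      (if l.head? == rep then l.tail.head? else l.head?) := by
  rcases h with ⟨hl, hr⟩ | ⟨x, hr, hx⟩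
  · subst hl; subst hr; simp
  · subst hr; exact pv_fallback l hnd x hx

-- the shared tail of both programs: A's interleaved result and fallbacks vs B's O(1) resolution
theorem pv_final (l : List String) (hnd : l.Nodup) (rep1 : Option String)
    (hmem : ∀ x, rep1 = some x → x ∈ l) :
    ((if rep1.isNone = true then pvHead l rep1 else rep1),
      (if (pvProsSkip l).isNone = true then
        (l.filter (fun s => decide (some s ≠
          (if rep1.isNone = true then pvHead l rep1 else rep1)))).head?
      else pvProsSkip l))
    = ((if rep1.isNone = true then l.head? else rep1),
       (if (if ((l.find? (fun s => pvHasRole s pvProspectWords)).isSome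
                && (l.find? (fun s => pvHasRole s pvProspectWords) == l.find? (fun s => pvHasRole s pvRepWords))) = true
            then pvFind2 (fun s => pvHasRole s pvProspectWords) l
            else l.find? (fun s => pvHasRole s pvProspectWords)).isNone = true
        then (if (l.head? == (if rep1.isNone = true then l.head? else rep1)) = true then l.tail.head? else l.head?)
        else (if ((l.find? (fun s => pvHasRole s pvProspectWords)).isSome
                && (l.find? (fun s => pvHasRole s pvProspectWords) == l.find? (fun s => pvHasRole s pvRepWords))) = true
              then pvFind2 (fun s => pvHasRole s pvProspectWords) l
              else l.find? (fun s => pvHasRole s pvProspectWords)))) := by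
  have hrep : (if rep1.isNone = true then pvHead l rep1 else rep1)
      = (if rep1.isNone = true then l.head? else rep1) := by
    cases rep1 <;> cases l <;> simp [pvHead]
  rw [hrep, pv_combo l hnd]
  have hfb : (l = [] ∧ (if rep1.isNone = true then l.head? else rep1) = none) ∨
      (∃ x, (if rep1.isNone = true then l.head? else rep1) = some x ∧ x ∈ l) := by
    cases hr1 : rep1 with
    | some x => exact Or.inr ⟨x, by simp, hmem x hr1⟩
    | none =>
      cases l with
      | nil => exact Or.inl ⟨rfl, by simp⟩
      | cons a t => exact Or.inr ⟨a, by simp, List.mem_cons_self⟩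
  rw [pv_fallback2 l hnd _ hfb]

theorem pv_ports_eq (turns : List (List (String × String))) (rep_name_hint : Option String) :
    identify_speakers_py turns rep_name_hint = identify_speakers_py_alt turns rep_name_hint := by
  simp only [identify_speakers_py, identify_speakers_py_alt]
  rw [pv_stepB_fold, pv_fuse]
  have hnew : pvNew PySem.Set.empty (turns.map pvSpk) = pvSpeakers turns := by
    rw [pv_new_empty]; rfl
  rw [hnew, pv_fold_main]
  have hnd : (pvSpeakers turns).Nodup := PySem.List.nodup_dedup _
  set l := pvSpeakers turns with hl
  cases rep_name_hint with
  | none =>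
    simp only [(pv_fold_s none l pvInit).1, (pv_fold_s none l pvInit).2,
      pv_fold_repR none l pvInit, (pv_fold_p none l pvInit).1, (pv_fold_p none l pvInit).2]
    simp only [pvInit, Option.isSome_none, Bool.false_eq_true, if_false, Bool.and_false,
      Option.isNone_none]
    exact pv_final l hnd _ (fun x hx => List.mem_of_find?_eq_some hx)
  | some h =>
    by_cases hh : h = ""
    · subst hh
      dsimp only
      simp only [ne_eq, not_true_eq_false, decide_false, Bool.false_and, Bool.false_eq_true,
        if_false, ite_false]
      simp only [(pv_fold_s none l pvInit).1, (pv_fold_s none l pvInit).2,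
        pv_fold_repR none l pvInit, (pv_fold_p none l pvInit).1, (pv_fold_p none l pvInit).2]
      simp only [pvInit, Option.isSome_none, Bool.false_eq_true, if_false, Bool.and_false,
        Option.isNone_none]
      exact pv_final l hnd _ (fun x hx => List.mem_of_find?_eq_some hx)
    · dsimp only
      have d1 : (decide (h ≠ "")) = true := by simp [hh]
      simp only [d1, Bool.true_and, eq_self_iff_true, if_true]
      simp only [(pv_fold_s (some (PySem.Str.lower h)) l pvInit).1,
        (pv_fold_s (some (PySem.Str.lower h)) l pvInit).2,
        pv_fold_repR (some (PySem.Str.lower h)) l pvInit,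
        (pv_fold_p (some (PySem.Str.lower h)) l pvInit).1,
        (pv_fold_p (some (PySem.Str.lower h)) l pvInit).2,
        pv_fold_hint (PySem.Str.lower h) l pvInit]
      simp only [pvInit, Option.isSome_none, Option.isSome_some, Bool.false_eq_true, if_false,
        Bool.and_true, Option.isNone_none, pvHintP]
      generalize hF : List.find? (fun spk => PySem.Str.isIn (PySem.Str.lower h) (PySem.Str.lower spk)) l = f
      cases f with
      | some y =>
        dsimp only
        refine pv_final l hnd _ (fun x hx => ?_)
        by_cases hc : (List.find? (fun s => pvHasRole s pvRepWords) l).isNone = true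
        · rw [if_pos hc] at hx
          cases hx
          exact List.mem_of_find?_eq_some hF
        · rw [if_neg hc] at hx
          exact List.mem_of_find?_eq_some hx
      | none =>
        dsimp only
        have e2 : (if (List.find? (fun s => pvHasRole s pvRepWords) l).isNone = true then
              List.find? (fun s => pvHasRole s pvRepWords) l
            else List.find? (fun s => pvHasRole s pvRepWords) l)
            = (if (List.find? (fun s => pvHasRole s pvRepWords) l).isNone = true then none
              else List.find? (fun s => pvHasRole s pvRepWords) l) := by
          cases h' : List.find? (fun s => pvHasRole s pvRepWords) l <;> simp
        rw [e2]
        refine pv_final l hnd _ (fun x hx => ?_)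
        by_cases hc : (List.find? (fun s => pvHasRole s pvRepWords) l).isNone = true
        · rw [if_pos hc] at hx
          cases hx
        · rw [if_neg hc] at hx
          exact List.mem_of_find?_eq_some hx

-- ===== VERDICT (by name: the statement is the Claim_ definition above) =====
theorem identify_speakers_py_spec : Claim_equal_identify_speakers_py := by
  intro turns rep_name_hint _ _
  unfold Spec_identify_speakers_py
  exact pv_ports_eq turns rep_name_hint
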